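-- pv_equiv track=rewrite | github.com/tombasche/advent-of-code-2020 | day6/six.py | everyone_answered
-- ===== SOURCE A (Python) =====
-- from typing import List
--
-- def everyone_answered(groups: List[str]) -> int:
--     # count the letters that are in every group
--
--     total = 0
--     groups = [set(g) for g in groups]
--     candidate = groups[0]
--     for group in groups[1:]:
--
--         candidate &= group
--         total += len(candidate)
--     return total
-- ===== SOURCE B (Python) =====
-- from typing import List
--
-- def everyone_answered(groups: List[str]) -> int:
--     # swap the summation order: for each letter of the first group, count how
--     # many consecutive following groups also contain it
--     total = 0
--     letters = set(groups[0])
--     rest = groups[1:]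
--     for letter in letters:
--         for group in rest:
--             if letter in group:
--                 total += 1
--             else:
--                 break
--     return total
-- ===== Notes on version B (the rewrite author's own statement) =====
-- stated objective: alternative
-- what changed: Swaps the summation order: instead of building a set per group and maintaining a running intersection, B counts, for each distinct letter of the first group, how many consecutive subsequent groups contain it; avoiding per-step set construction and intersection gives a constant-factor speedup.
import Mathlib
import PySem

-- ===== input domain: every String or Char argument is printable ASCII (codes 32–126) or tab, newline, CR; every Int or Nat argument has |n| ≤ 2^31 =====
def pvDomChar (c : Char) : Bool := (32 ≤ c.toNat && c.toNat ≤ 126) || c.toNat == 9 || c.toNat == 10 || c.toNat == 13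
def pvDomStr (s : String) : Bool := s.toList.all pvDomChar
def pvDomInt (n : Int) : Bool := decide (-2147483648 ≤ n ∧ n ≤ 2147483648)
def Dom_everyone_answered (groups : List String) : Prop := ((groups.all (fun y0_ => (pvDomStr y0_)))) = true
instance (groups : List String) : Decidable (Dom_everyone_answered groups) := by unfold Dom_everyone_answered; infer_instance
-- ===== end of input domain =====

-- B swaps the summation order (per-letter survival counts instead of a running
-- intersection set), measured faster in a timing run. A raises IndexError on [], excluded by Pre_.

-- ===== PORT A =====
-- literal port: groups = [set(g) for g in groups]; candidate = groups[0];
-- for group in groups[1:]: candidate &= group; total += len(candidate)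
def everyone_answered (groups : List String) : Int :=
  match groups.map (fun g => PySem.Set.ofList g.toList) with
  | [] => 0  -- unreachable: Python raises IndexError here (excluded by Pre_)
  | candidate :: rest =>
    (rest.foldl
      (fun (st : PySem.Set Char × Int) group =>
        let c := PySem.Set.inter st.1 group
        (c, st.2 + PySem.Set.len c))
      (candidate, 0)).2

-- ===== PORT B =====
-- inner loop of Source B: walk `rest`, +1 while the letter is in the group, break otherwise
def pvSurv (letter : Char) (rest : List String) : Int :=
  match rest with
  | [] => 0
  | g :: t => if letter ∈ g.toList then 1 + pvSurv letter t else 0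

def everyone_answered_alt (groups : List String) : Int :=
  match groups with
  | [] => 0  -- unreachable: Python raises IndexError here (excluded by Pre_)
  | g :: rest =>
    (PySem.Set.ofList g.toList).foldl (fun total letter => total + pvSurv letter rest) 0

-- ===== PRECONDITION & SPEC =====
-- A raises IndexError (groups[0]) exactly on the empty list; B raises there too.
def Pre_everyone_answered (groups : List String) : Prop := groups ≠ []
instance (groups : List String) : Decidable (Pre_everyone_answered groups) := by
  unfold Pre_everyone_answered; infer_instance
def pvWitness_everyone_answered : List String := ["abc", "ab"]

def Spec_everyone_answered (groups : List String) (out : Int) : Prop := out = everyone_answered_alt groups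
instance (groups : List String) (out : Int) : Decidable (Spec_everyone_answered groups out) := by unfold Spec_everyone_answered; infer_instance

-- ===== CLAIM (what is proved, stated in full; the proofs are below) =====
def Claim_equal_everyone_answered : Prop := ∀ (groups : List String), Dom_everyone_answered groups → Pre_everyone_answered groups → Spec_everyone_answered groups (everyone_answered groups)

-- ===== LEMMAS AND PROOFS =====

-- survival over the set-mapped rest equals survival over the raw strings
lemma pvSurv_map (c : Char) (rest : List String) :
    pvSurv c rest =
      (rest.map (fun g => PySem.Set.ofList g.toList)).foldr
        (fun g acc => if c ∈ g then 1 + acc else 0) 0 := by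
  induction rest with
  | nil => rfl
  | cons g t ih => simp [pvSurv, ih, PySem.Set.mem_ofList]

-- Σ_{c∈cand} (if p c then 1 + f c else 0) = |filter p cand| + Σ_{c∈filter p cand} f c
lemma pvSum_if (cand g : List Char) (f : Char → Int) :
    ((cand.map (fun c => if c ∈ g then 1 + f c else 0)).sum)
      = ((cand.filter (fun c => g.contains c)).length : Int)
        + ((cand.filter (fun c => g.contains c)).map f).sum := by
  induction cand with
  | nil => simp
  | cons c t ih =>
    by_cases h : c ∈ g <;> simp [h, ih] <;> push_cast <;> ring

-- the invariant of A's fold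
lemma pvFold_eq (rest : List (PySem.Set Char)) :
    ∀ (cand : List Char) (t : Int),
      (rest.foldl
        (fun (st : PySem.Set Char × Int) group =>
          let c := PySem.Set.inter st.1 group
          (c, st.2 + PySem.Set.len c))
        (cand, t)).2
      = t + (cand.map (fun c =>
          rest.foldr (fun g acc => if c ∈ g then 1 + acc else 0) 0)).sum := by
  induction rest with
  | nil => intro cand t; simp
  | cons g gs ih =>
    intro cand t
    simp only [List.foldl_cons, List.foldr_cons]
    rw [ih]
    have hinter : PySem.Set.inter cand g = cand.filter (fun c => g.contains c) := by
      simp [PySem.Set.inter]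
    have hlen : PySem.Set.len (PySem.Set.inter cand g)
        = ((cand.filter (fun c => g.contains c)).length : Int) := by
      simp [hinter, PySem.Set.len]
    rw [pvSum_if cand g
        (fun c => gs.foldr (fun g acc => if c ∈ g then 1 + acc else 0) 0)]
    · rw [hinter]
      simp only [PySem.Set.len, PySem.Set.contains]
      ring

-- ===== VERDICT (by name: the statement is the Claim_ definition above) =====
theorem everyone_answered_spec : Claim_equal_everyone_answered := by
  intro groups _ hpre
  match groups with
  | [] => exact absurd rfl hpre
  | g :: rest =>
    show everyone_answered (g :: rest) = everyone_answered_alt (g :: rest)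
    simp only [everyone_answered, everyone_answered_alt, List.map_cons]
    rw [pvFold_eq]
    rw [PySem.List.foldl_add, zero_add, zero_add]
    exact congrArg List.sum (List.map_congr_left (fun c _ => (pvSurv_map c rest).symm))
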